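-- pv_equiv track=rewrite | github.com/pypi-data/pypi-mirror-390 | packages/more-compute/more_compute-0.4.4-py3-none-any.whl/morecompute/utils/py_percent_parser.py | generate_py_percent
-- ===== SOURCE A (Python) =====
-- from typing import List, Dict, Optional
--
-- def generate_py_percent(cells: List[Dict]) -> str:
--     """
--     Generate py:percent format from cell list.
--
--     Args:
--         cells: List of cell dicts with 'cell_type' and 'source'
--
--     Returns:
--         String in py:percent format
--     """
--     lines = []
--
--     for i, cell in enumerate(cells):
--         cell_type = cell.get('cell_type', 'code')
--         source = cell.get('source', '')
--
--         # Ensure source is string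
--         if isinstance(source, list):
--             source = ''.join(source)
--
--         # Add cell marker
--         if cell_type == 'markdown':
--             lines.append('# %% [markdown]')
--             # Add # prefix to each line of markdown
--             for line in source.split('\n'):
--                 if line.strip():
--                     lines.append(f'# {line}')
--                 else:
--                     lines.append('#')
--         else:
--             lines.append('# %%')
--             lines.append(source)
--
--         # Add blank line between cells
--         if i < len(cells) - 1:
--             lines.append('')
--
--     return '\n'.join(lines)
-- ===== SOURCE B (Python) =====
-- def generate_py_percent(cells):
--     """
--     Generate py:percent format from cell list.
--
--     Recursive: emit the first cell's block directly into the result string and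
--     recurse on the rest; markdown prefixes are produced by a single left-to-right
--     character scan of the source (no split/line list is ever built).
--     """
--     if not cells:
--         return ''
--     cell = cells[0]
--     source = cell.get('source', '')
--     if isinstance(source, list):
--         source = ''.join(source)
--     if cell.get('cell_type', 'code') == 'markdown':
--         block = '# %% [markdown]' + _md_scan(source)
--     else:
--         block = '# %%\n' + source
--     rest = cells[1:]
--     return block if not rest else block + '\n\n' + generate_py_percent(rest)
--
--
-- def _md_scan(source):
--     """One pass over the characters: buffer the current line, flush a
--     '#'-prefixed copy ('# '+line, or bare '#' when the line is whitespace-only)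
--     at each newline and once at the end."""
--     out = []
--     line = []
--     for ch in source:
--         if ch == '\n':
--             out.append(_flush(line))
--             line = []
--         else:
--             line.append(ch)
--     out.append(_flush(line))
--     return ''.join(out)
--
--
-- def _flush(line):
--     s = ''.join(line)
--     return '\n# ' + s if s.strip() else '\n#'
-- ===== Notes on version B (the rewrite author's own statement) =====
-- stated objective: alternative
-- what changed: B is a recursion over the cell list that concatenates each cell's block string directly (no flat line list, no enumerate/index separator branch), and builds markdown '#'-prefixes by a single character scan of the source with a line buffer instead of split('\n') plus a per-line loop.
import Mathlib
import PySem

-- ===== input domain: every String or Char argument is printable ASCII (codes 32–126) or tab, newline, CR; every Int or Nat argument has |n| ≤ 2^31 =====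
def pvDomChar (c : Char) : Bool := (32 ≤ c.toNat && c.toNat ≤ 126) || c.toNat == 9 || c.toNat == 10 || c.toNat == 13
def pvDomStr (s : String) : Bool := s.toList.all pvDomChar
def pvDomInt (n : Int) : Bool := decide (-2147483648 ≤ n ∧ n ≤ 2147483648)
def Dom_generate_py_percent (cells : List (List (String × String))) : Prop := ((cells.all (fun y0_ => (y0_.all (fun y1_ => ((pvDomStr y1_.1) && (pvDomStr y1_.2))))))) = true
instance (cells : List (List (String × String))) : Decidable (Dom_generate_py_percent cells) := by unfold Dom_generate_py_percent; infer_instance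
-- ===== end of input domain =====

-- B replaces A's flat line accumulator by a recursion over the cells that concatenates
-- strings directly, and produces markdown prefixes by a single character scan of the
-- source instead of split('\n') + per-line list building (objective: alternative).

-- ===== PORT A =====
-- A's inner markdown loop body: 'if line.strip(): lines.append("# "+line) else: lines.append("#")'
def pyLineAcc (ls : List String) (line : String) : List String :=
  if PySem.Str.strip line ≠ "" then ls ++ ["# " ++ line] else ls ++ ["#"]

-- A's per-cell loop body (n = len(cells)); ic = (i, cell) from enumerate
def pyCellStep (n : Int) (lines : List String) (ic : Int × List (String × String)) : List String :=
  let cell_type := (ic.2.lookup "cell_type").getD "code"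
  let source := (ic.2.lookup "source").getD ""
  let lines :=
    if cell_type = "markdown" then
      ((PySem.Str.split? source "\n").getD []).foldl pyLineAcc (lines ++ ["# %% [markdown]"])
    else lines ++ ["# %%", source]
  if ic.1 < n - 1 then lines ++ [""] else lines

def generate_py_percent (cells : List (List (String × String))) : String :=
  PySem.Str.join "\n" ((PySem.List.enumerate cells 0).foldl (pyCellStep (cells.length : Int)) [])

-- ===== PORT B =====
-- Source B's _flush: '\n# ' + s if s.strip() else '\n#'
def mdFlush (line : List Char) : List Char :=
  if PySem.Chars.strip line ≠ [] then '\n' :: '#' :: ' ' :: line else ['\n', '#']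

-- Source B's scan loop body: state = (out, current line buffer)
def mdStep (st : List (List Char) × List Char) (ch : Char) : List (List Char) × List Char :=
  if ch = '\n' then (st.1 ++ [mdFlush st.2], []) else (st.1, st.2 ++ [ch])

-- Source B's _md_scan: one pass over the characters, then ''.join(out + [flush(line)])
def mdScan (source : List Char) : List Char :=
  let st := source.foldl mdStep ([], [])
  PySem.Chars.join [] (st.1 ++ [mdFlush st.2])

-- Source B's generate_py_percent: recursion over the cell list, direct concatenation
def generate_py_percent_alt : List (List (String × String)) → String
  | [] => ""
  | cell :: rest =>
    let source := (cell.lookup "source").getD ""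
    let block : List Char :=
      if (cell.lookup "cell_type").getD "code" = "markdown" then
        "# %% [markdown]".toList ++ mdScan source.toList
      else "# %%\n".toList ++ source.toList
    if rest.isEmpty then String.ofList block
    else String.ofList (block ++ "\n\n".toList ++ (generate_py_percent_alt rest).toList)

-- ===== PRECONDITION & SPEC =====
def Spec_generate_py_percent (cells : List (List (String × String))) (out : String) : Prop := out = generate_py_percent_alt cells
instance (cells : List (List (String × String))) (out : String) : Decidable (Spec_generate_py_percent cells out) := by unfold Spec_generate_py_percent; infer_instance

-- ===== CLAIM (what is proved, stated in full; the proofs are below) =====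
def Claim_equal_generate_py_percent : Prop := ∀ (cells : List (List (String × String))), Dom_generate_py_percent cells → Spec_generate_py_percent cells (generate_py_percent cells)

-- ===== LEMMAS AND PROOFS =====

-- the lines A emits for one cell (marker line first, so never empty)
def cellLines (cell : List (String × String)) : List String :=
  if (cell.lookup "cell_type").getD "code" = "markdown" then
    ["# %% [markdown]"] ++
      ((PySem.Str.split? ((cell.lookup "source").getD "") "\n").getD []).map
        (fun line => if PySem.Str.strip line ≠ "" then "# " ++ line else "#")
  else ["# %%", (cell.lookup "source").getD ""]

-- line-lists interleaved with a "" separator element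
def pvSep (bs : List (List String)) : List String :=
  match bs with
  | [] => []
  | [b] => b
  | b :: b2 :: bs' => b ++ [""] ++ pvSep (b2 :: bs')

lemma cellLines_ne_nil (c : List (String × String)) : cellLines c ≠ [] := by
  unfold cellLines; split <;> simp

lemma foldl_pyLineAcc (lines : List String) (ls : List String) :
    lines.foldl pyLineAcc ls =
      ls ++ lines.map (fun line => if PySem.Str.strip line ≠ "" then "# " ++ line else "#") := by
  have h : pyLineAcc = fun ls line =>
      ls ++ [if PySem.Str.strip line ≠ "" then "# " ++ line else "#"] := by
    funext ls line; unfold pyLineAcc; split <;> simp_all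
  rw [h]
  exact PySem.List.foldl_append_singleton_eq_map ..

lemma pyCellStep_eq (n i : Int) (c : List (String × String)) (acc : List String) :
    pyCellStep n acc (i, c) = acc ++ cellLines c ++ (if i < n - 1 then [""] else []) := by
  unfold pyCellStep cellLines
  simp only [foldl_pyLineAcc]
  split <;> split <;> simp

-- A's loop produces exactly the separator-interleaved cell line-lists
lemma foldl_enumerate_eq (cs : List (List (String × String))) :
    ∀ (n s : Int) (acc : List String), s + (cs.length : Int) = n →
    (PySem.List.enumerate cs s).foldl (pyCellStep n) acc = acc ++ pvSep (cs.map cellLines) := by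
  induction cs with
  | nil => intro n s acc _; simp [PySem.List.enumerate_nil, pvSep]
  | cons c cs ih =>
    intro n s acc hn
    rw [PySem.List.enumerate_cons, List.foldl_cons, pyCellStep_eq]
    cases cs with
    | nil =>
      have : ¬ s < n - 1 := by simp at hn; omega
      simp [PySem.List.enumerate_nil, this, pvSep]
    | cons c2 cs' =>
      have hlt : s < n - 1 := by simp at hn; omega
      rw [if_pos hlt, ih n (s + 1) _ (by simp at hn ⊢; omega)]
      simp [pvSep]

-- Chars-level: join splits across a nonempty prefix
lemma charsJoin_append (sep : List Char) (x : List Char) (xs : List (List Char))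
    (y : List Char) (ys : List (List Char)) :
    PySem.Chars.join sep ((x :: xs) ++ y :: ys) =
      PySem.Chars.join sep (x :: xs) ++ sep ++ PySem.Chars.join sep (y :: ys) := by
  induction xs generalizing x with
  | nil => simp [PySem.Chars.join_cons_cons, PySem.Chars.join_singleton]
  | cons x2 xs ih =>
    show PySem.Chars.join sep (x :: x2 :: (xs ++ y :: ys)) = _
    rw [PySem.Chars.join_cons_cons]
    have h2 : x2 :: (xs ++ y :: ys) = (x2 :: xs) ++ y :: ys := rfl
    rw [h2, ih x2, PySem.Chars.join_cons_cons]
    simp [List.append_assoc]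

-- the "" separators of the flat line list become the '\n\n' of the block join
lemma join_pvSep (bs : List (List String)) (hne : ∀ b ∈ bs, b ≠ []) :
    PySem.Chars.join ['\n'] ((pvSep bs).map String.toList) =
      PySem.Chars.join ['\n', '\n']
        (bs.map (fun b => PySem.Chars.join ['\n'] (b.map String.toList))) := by
  induction bs with
  | nil => simp [pvSep, PySem.Chars.join_nil]
  | cons b tl ih =>
    cases tl with
    | nil => simp [pvSep, PySem.Chars.join_singleton]
    | cons b2 bs' =>
      have hb : b ≠ [] := hne b (by simp)
      have hb2 : b2 ≠ [] := hne b2 (by simp)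
      obtain ⟨x, xs, rfl⟩ := List.exists_cons_of_ne_nil hb
      have hsep : pvSep (b2 :: bs') ≠ [] := by
        cases bs' <;> simp [pvSep, hb2]
      obtain ⟨z, zs, hz⟩ := List.exists_cons_of_ne_nil hsep
      have lhs : pvSep ((x :: xs) :: b2 :: bs') = (x :: xs) ++ [""] ++ pvSep (b2 :: bs') := by
        simp [pvSep]
      rw [lhs, hz]
      have : ((x :: xs) ++ [""] ++ z :: zs).map String.toList =
          (x.toList :: xs.map String.toList) ++ [] :: (z :: zs).map String.toList := by
        simp
      rw [this, charsJoin_append]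
      simp only [List.map_cons]
      rw [PySem.Chars.join_cons_cons]
      have hmap : (z.toList :: List.map String.toList zs) =
          List.map String.toList (pvSep (b2 :: bs')) := by rw [hz]; rfl
      rw [hmap, ih (fun b hb' => hne b (by simp [hb'])), PySem.Chars.join_cons_cons]
      simp [List.append_assoc]

-- ---------- B side ----------

-- prepend a buffer to the first piece
def headCons (pre : List Char) (ls : List (List Char)) : List (List Char) :=
  match ls with
  | [] => [pre]
  | h :: t => (pre ++ h) :: t

-- specification split on '\n': simple structural recursion
def sSplit : List Char → List (List Char)
  | [] => [[]]
  | c :: cs => if c = '\n' then [] :: sSplit cs else headCons [c] (sSplit cs)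

lemma sSplit_nil : sSplit [] = [[]] := rfl

lemma sSplit_cons (c : Char) (cs : List Char) :
    sSplit (c :: cs) = if c = '\n' then [] :: sSplit cs else headCons [c] (sSplit cs) := rfl

lemma sSplit_ne_nil (cs : List Char) : sSplit cs ≠ [] := by
  cases cs with
  | nil => simp [sSplit_nil]
  | cons c cs =>
    rw [sSplit_cons]
    split
    · simp
    · unfold headCons; split <;> simp

lemma headCons_headCons (p q : List Char) (ls : List (List Char)) :
    headCons p (headCons q ls) = headCons (p ++ q) ls := by
  cases ls <;> simp [headCons]

lemma headCons_nil (ls : List (List Char)) (h : ls ≠ []) : headCons [] ls = ls := by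
  cases ls with
  | nil => exact absurd rfl h
  | cons a t => simp [headCons]

-- PySem's splitOn on the one-char separator '\n' is the simple recursion sSplit
lemma go_newline (fuel : Nat) : ∀ (l cur : List Char) (acc : List (List Char)),
    l.length < fuel →
    PySem.Chars.splitOn.go ['\n'] fuel l cur acc =
      acc.reverse ++ headCons cur.reverse (sSplit l) := by
  induction fuel with
  | zero => intro l cur acc h; omega
  | succ n ih =>
    intro l cur acc h
    cases l with
    | nil => simp [PySem.Chars.splitOn.go, sSplit_nil, headCons]
    | cons c rest =>
      by_cases hc : c = '\n'
      · subst hc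
        have hpre : List.isPrefixOf ['\n'] ('\n' :: rest) = true := by
          simp [List.isPrefixOf]
        simp only [PySem.Chars.splitOn.go, hpre, if_pos]
        rw [show List.drop (List.length ['\n']) ('\n' :: rest) = rest from rfl]
        rw [ih rest [] _ (by simpa using Nat.lt_of_succ_lt_succ h)]
        rw [List.reverse_nil, headCons_nil _ (sSplit_ne_nil rest)]
        rw [sSplit_cons, if_pos rfl]
        simp [headCons]
      · have hpre : List.isPrefixOf ['\n'] (c :: rest) = false := by
          simp [List.isPrefixOf]
          intro h'; exact absurd h'.symm hc
        simp only [PySem.Chars.splitOn.go, hpre]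
        rw [if_neg (by simp)]
        rw [ih rest (c :: cur) acc (by simpa using Nat.lt_of_succ_lt_succ h)]
        rw [sSplit_cons, if_neg hc, headCons_headCons]
        simp

lemma splitOn_newline (s : List Char) :
    PySem.Chars.splitOn s ['\n'] = sSplit s := by
  unfold PySem.Chars.splitOn
  rw [go_newline (s.length + 1) s [] [] (by omega)]
  rw [show ([] : List Char).reverse = [] from rfl, headCons_nil _ (sSplit_ne_nil s)]
  rfl

-- ''.join is concatenation
lemma join_empty_sep (ls : List (List Char)) :
    PySem.Chars.join [] ls = ls.flatten := by
  induction ls with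
  | nil => simp [PySem.Chars.join_nil]
  | cons x xs ih =>
    cases xs with
    | nil => simp [PySem.Chars.join_singleton]
    | cons y ys => rw [PySem.Chars.join_cons_cons]; simp_all

-- Source B's scan loop, fully characterised by sSplit
lemma mdFold (cs : List Char) : ∀ (out : List (List Char)) (line : List Char),
    (cs.foldl mdStep (out, line)).1 ++ [mdFlush (cs.foldl mdStep (out, line)).2] =
      out ++ (headCons line (sSplit cs)).map mdFlush := by
  induction cs with
  | nil => intro out line; simp [sSplit_nil, headCons]
  | cons c cs ih =>
    intro out line
    by_cases hc : c = '\n'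
    · subst hc
      rw [List.foldl_cons, show mdStep (out, line) '\n' = (out ++ [mdFlush line], []) from by
        simp [mdStep]]
      rw [ih, sSplit_cons, if_pos rfl, headCons_nil _ (sSplit_ne_nil cs)]
      have : headCons line ([] :: sSplit cs) = line :: sSplit cs := by simp [headCons]
      rw [this]
      simp
    · rw [List.foldl_cons, show mdStep (out, line) c = (out, line ++ [c]) from by
        simp [mdStep, hc]]
      rw [ih, sSplit_cons, if_neg hc, headCons_headCons]

-- join with '\n' of a nonempty list, flatten form
lemma join_newline_cons (h : List Char) (ps : List (List Char)) :
    PySem.Chars.join ['\n'] (h :: ps) = h ++ (ps.map (fun p => '\n' :: p)).flatten := by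
  induction ps generalizing h with
  | nil => simp [PySem.Chars.join_singleton]
  | cons p ps ih => rw [PySem.Chars.join_cons_cons, ih]; simp

-- the line prefix A computes, on the char level
def prefChars (l : List Char) : List Char :=
  if PySem.Chars.strip l ≠ [] then '#' :: ' ' :: l else ['#']

lemma mdFlush_eq (l : List Char) : mdFlush l = '\n' :: prefChars l := by
  unfold mdFlush prefChars; split <;> simp

lemma mdScan_eq (src : List Char) :
    mdScan src = ((sSplit src).map mdFlush).flatten := by
  unfold mdScan
  rw [join_empty_sep]
  have h := mdFold src [] []
  simp only [List.nil_append] at h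
  rw [h, headCons_nil _ (sSplit_ne_nil src)]

-- A's per-line strings, char level
lemma map_toList_pref (lines : List String) :
    (lines.map (fun line => if PySem.Str.strip line ≠ "" then "# " ++ line else "#")).map
        String.toList =
      (lines.map String.toList).map prefChars := by
  simp only [List.map_map, List.map_inj_left]
  intro line _
  simp only [Function.comp, prefChars]
  by_cases h : PySem.Chars.strip line.toList = []
  · have h' : PySem.Str.strip line = "" := by
      apply String.toList_inj.mp
      rw [PySem.Str.toList_strip, h]; rfl
    rw [if_neg (by simp [h']), if_neg (by simp [h])]
    rfl
  · have h' : PySem.Str.strip line ≠ "" := by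
      intro he
      apply h
      have ht := PySem.Str.toList_strip line
      rw [he] at ht; exact ht.symm
    rw [if_pos h', if_pos h, String.toList_append]
    rfl

-- A's split of the source, char level
lemma split_toList (source : String) :
    ((PySem.Str.split? source "\n").getD []).map String.toList = sSplit source.toList := by
  have hb := PySem.Str.split?_map source "\n"
  rw [show ("\n" : String).toList = ['\n'] from rfl] at hb
  unfold PySem.Chars.split? at hb
  rw [if_neg (by simp)] at hb
  rw [splitOn_newline] at hb
  cases hsp : PySem.Str.split? source "\n" with
  | none => rw [hsp] at hb; simp at hb
  | some ls =>
    rw [hsp] at hb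
    simp only [Option.map_some] at hb
    simpa using Option.some.inj hb

-- the char block B builds for one cell
def blockChars (cell : List (String × String)) : List Char :=
  if (cell.lookup "cell_type").getD "code" = "markdown" then
    "# %% [markdown]".toList ++ mdScan ((cell.lookup "source").getD "").toList
  else "# %%\n".toList ++ ((cell.lookup "source").getD "").toList

-- B's block equals the '\n'-join of the lines A emits for that cell
lemma blockChars_eq (c : List (String × String)) :
    blockChars c = PySem.Chars.join ['\n'] ((cellLines c).map String.toList) := by
  unfold blockChars cellLines
  by_cases h : (c.lookup "cell_type").getD "code" = "markdown"
  · rw [if_pos h, if_pos h]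
    rw [mdScan_eq]
    simp only [List.map_cons, List.singleton_append]
    rw [join_newline_cons]
    congr 1
    rw [map_toList_pref, split_toList, List.map_map]
    congr 1
    exact List.map_congr_left (fun l _ => by simp [mdFlush_eq, Function.comp])
  · rw [if_neg h, if_neg h]
    simp only [List.map_cons, List.map_nil]
    rw [PySem.Chars.join_cons_cons, PySem.Chars.join_singleton]
    rfl

lemma toList_ofList (cs : List Char) : (String.ofList cs).toList = cs := by
  simp

-- one step of B's recursion, with the block named
lemma alt_cons (c : List (String × String)) (rest : List (List (String × String))) :
    generate_py_percent_alt (c :: rest) =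
      if rest.isEmpty then String.ofList (blockChars c)
      else String.ofList (blockChars c ++ "\n\n".toList ++ (generate_py_percent_alt rest).toList) := rfl

-- B's recursion equals the '\n\n'-join of the blocks
lemma alt_toList (cells : List (List (String × String))) :
    (generate_py_percent_alt cells).toList =
      PySem.Chars.join ['\n', '\n'] (cells.map blockChars) := by
  induction cells with
  | nil => simp [generate_py_percent_alt, PySem.Chars.join_nil]
  | cons c rest ih =>
    rw [alt_cons]
    cases rest with
    | nil =>
      rw [if_pos List.isEmpty_nil, toList_ofList]
      simp only [List.map_cons, List.map_nil, PySem.Chars.join_singleton]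
    | cons c2 rest' =>
      rw [if_neg (by simp), toList_ofList]
      simp only [List.map_cons]
      rw [PySem.Chars.join_cons_cons, ← List.map_cons, ← ih]
      rfl

-- ===== VERDICT (by name: the statement is the Claim_ definition above) =====
theorem generate_py_percent_spec : Claim_equal_generate_py_percent := by
  intro cells _
  unfold Spec_generate_py_percent generate_py_percent
  rw [foldl_enumerate_eq cells (cells.length : Int) 0 [] (by simp)]
  apply String.toList_inj.mp
  rw [List.nil_append, PySem.Str.toList_join, alt_toList]
  have hb : ∀ b ∈ cells.map cellLines, b ≠ [] := by
    intro b hbm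
    obtain ⟨c, _, rfl⟩ := List.mem_map.mp hbm
    exact cellLines_ne_nil c
  rw [show ("\n" : String).toList = ['\n'] from rfl,
    join_pvSep (cells.map cellLines) hb]
  congr 1
  simp only [List.map_map, List.map_inj_left]
  intro c _
  simp [Function.comp, blockChars_eq]
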